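-- pv_equiv track=rewrite | github.com/yei-pi/image-processing-unit2 | pure_python_filters.py | gaussian_filter_python
-- ===== SOURCE A (Python) =====
-- def _pad_image_zero(image, pad=1):
--     """
--     Agrega padding de ceros alrededor de la imagen.
--
--     Parámetros:
--         image (list[list[int]]): imagen como lista de listas
--         pad (int): grosor del padding
--
--     Retorna:
--         list[list[int]]: imagen con padding
--     """
--     h = len(image)
--     w = len(image[0])
--
--     padded = [[0 for _ in range(w + 2 * pad)] for _ in range(h + 2 * pad)]
--
--     for i in range(h):
--         for j in range(w):
--             padded[i + pad][j + pad] = int(image[i][j])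
--
--     return padded
--
-- def gaussian_filter_python(image):
--     """
--     Aplica filtro gaussiano 3x3 usando Python puro.
--
--     Kernel:
--         1 2 1
--         2 4 2
--         1 2 1
--
--     Todo dividido entre 16.
--     """
--     kernel = [
--         [1, 2, 1],
--         [2, 4, 2],
--         [1, 2, 1],
--     ]
--     denom = 16
--
--     h = len(image)
--     w = len(image[0])
--
--     padded = _pad_image_zero(image, 1)
--     out = [[0 for _ in range(w)] for _ in range(h)]
--
--     for i in range(h):
--         for j in range(w):
--             total = 0
--
--             for ki in range(3):
--                 for kj in range(3):
--                     total += padded[i + ki][j + kj] * kernel[ki][kj]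
--
--             value = int(round(total / denom))
--             value = max(0, min(255, value))
--             out[i][j] = value
--
--     return out
-- ===== SOURCE B (Python) =====
-- def gaussian_filter_python(image):
--     """Separable 3x3 Gaussian: horizontal [1,2,1] pass to an exact integer
--     intermediate, then vertical [1,2,1] pass with the final /16 round+clamp."""
--     h = len(image)
--     w = len(image[0])
--     zrow = [0] * (w + 2)
--     padded = [zrow] + [[0] + [int(x) for x in row[:w]] + [0] for row in image] + [zrow]
--     temp = [[a + 2 * b + c for a, b, c in zip(r, r[1:], r[2:])] for r in padded]
--     out = []
--     for r0, r1, r2 in zip(temp, temp[1:], temp[2:]):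
--         out.append([max(0, min(255, int(round((a + 2 * b + c) / 16))))
--                     for a, b, c in zip(r0, r1, r2)])
--     return out
-- ===== Notes on version B (the rewrite author's own statement) =====
-- stated objective: faster
-- what changed: Replaces the 9-tap 3x3 convolution with two separable 1-D [1,2,1] passes (an exact integer horizontal pass into an intermediate table, then a vertical pass with the single final /16 round-and-clamp), using zip-based sliding windows instead of per-pixel index arithmetic.
import Mathlib
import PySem

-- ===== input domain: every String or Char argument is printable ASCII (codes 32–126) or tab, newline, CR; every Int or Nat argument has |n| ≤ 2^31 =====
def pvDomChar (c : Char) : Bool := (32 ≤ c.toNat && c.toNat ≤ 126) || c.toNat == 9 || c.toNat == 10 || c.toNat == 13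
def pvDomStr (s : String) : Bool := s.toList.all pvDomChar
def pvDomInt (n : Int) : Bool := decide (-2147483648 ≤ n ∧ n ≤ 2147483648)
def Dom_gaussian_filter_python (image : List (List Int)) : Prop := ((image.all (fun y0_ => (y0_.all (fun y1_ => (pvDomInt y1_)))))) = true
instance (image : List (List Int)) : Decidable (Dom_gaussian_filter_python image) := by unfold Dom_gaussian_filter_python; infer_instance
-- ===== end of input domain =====

-- B replaces the 9-tap 3x3 convolution by two separable 1-D [1,2,1] passes over an exact
-- integer intermediate table (same values; measurably faster by a constant factor).

-- ===== PORT A =====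
-- int(round(total/16)): total/16 is exact in a Python float for the magnitudes that
-- arise here (|total| ≤ 9*4*2^31 < 2^53), so round() is exact round-half-to-even.
def pvRound16 (t : Int) : Int :=
  let q := PySem.Int.floordiv t 16
  let r := PySem.Int.mod t 16
  if r < 8 then q else if r = 8 then (if PySem.Int.mod q 2 = 0 then q else q + 1) else q + 1

-- _pad_image_zero: a (h+2)×(w+2) grid of zeros with padded[i+1][j+1] := int(image[i][j])
-- for i<h, j<w, expressed cell by cell (exact: each cell is either one assigned value or 0).
def pvPadA (image : List (List Int)) : List (List Int) :=
  let h := image.length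
  let w := (image.headD []).length
  (List.range (h + 2)).map (fun r => (List.range (w + 2)).map (fun c =>
    if 1 ≤ r ∧ r ≤ h ∧ 1 ≤ c ∧ c ≤ w then (image.getD (r - 1) []).getD (c - 1) 0 else 0))

def pvKernel : List (List Int) := [[1, 2, 1], [2, 4, 2], [1, 2, 1]]

def gaussian_filter_python (image : List (List Int)) : List (List Int) :=
  let h := image.length
  let w := (image.headD []).length
  let padded := pvPadA image
  (List.range h).map (fun i => (List.range w).map (fun j =>
    let total := (List.range 3).foldl (fun t ki => (List.range 3).foldl (fun t kj =>
      t + ((padded.getD (i + ki) []).getD (j + kj) 0) * ((pvKernel.getD ki []).getD kj 0)) t) 0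
    let value := pvRound16 total
    max 0 (min 255 value)))

-- ===== PORT B =====
-- padded = [zrow] + [[0] + [int(x) for x in row[:w]] + [0] for row in image] + [zrow]
def pvPadB (image : List (List Int)) : List (List Int) :=
  let w := (image.headD []).length
  List.replicate (w + 2) (0 : Int) ::
    (image.map (fun row => 0 :: (row.take w ++ [0])) ++ [List.replicate (w + 2) (0 : Int)])

-- [a + 2*b + c for a, b, c in zip(r, r[1:], r[2:])]  (sliding window of width 3)
def pvHPass : List Int → List Int
  | a :: b :: c :: rest => (a + 2 * b + c) :: pvHPass (b :: c :: rest)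
  | _ => []
  decreasing_by simp

-- [max(0, min(255, int(round((a + 2*b + c)/16)))) for a, b, c in zip(r0, r1, r2)]
def pvVComb : List Int → List Int → List Int → List Int
  | a :: as, b :: bs, c :: cs => (max 0 (min 255 (pvRound16 (a + 2 * b + c)))) :: pvVComb as bs cs
  | _, _, _ => []

-- outer loop: for r0, r1, r2 in zip(temp, temp[1:], temp[2:])
def pvVPass : List (List Int) → List (List Int)
  | r0 :: r1 :: r2 :: rest => pvVComb r0 r1 r2 :: pvVPass (r1 :: r2 :: rest)
  | _ => []
  decreasing_by simp

def gaussian_filter_python_alt (image : List (List Int)) : List (List Int) :=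
  pvVPass ((pvPadB image).map pvHPass)

-- ===== PRECONDITION & SPEC =====
-- Pre_ excludes exactly the inputs where A raises IndexError: the empty image
-- (image[0]) and ragged images with a row shorter than row 0 (image[i][j], j < w).
def Pre_gaussian_filter_python (image : List (List Int)) : Prop :=
  image ≠ [] ∧ ∀ row ∈ image, (image.headD []).length ≤ row.length
instance (image : List (List Int)) : Decidable (Pre_gaussian_filter_python image) := by
  unfold Pre_gaussian_filter_python; infer_instance

def pvWitness_gaussian_filter_python : List (List Int) := [[10, 200, 30], [40, 50, 255], [0, 7, 99]]

def Spec_gaussian_filter_python (image : List (List Int)) (out : List (List Int)) : Prop := out = gaussian_filter_python_alt image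
instance (image : List (List Int)) (out : List (List Int)) : Decidable (Spec_gaussian_filter_python image out) := by unfold Spec_gaussian_filter_python; infer_instance

-- ===== CLAIM (what is proved, stated in full; the proofs are below) =====
def Claim_equal_gaussian_filter_python : Prop := ∀ (image : List (List Int)), Dom_gaussian_filter_python image → Pre_gaussian_filter_python image → Spec_gaussian_filter_python image (gaussian_filter_python image)

-- ===== LEMMAS AND PROOFS =====

-- the value of any cell of either padded image
def pvCell (image : List (List Int)) (r c : Nat) : Int :=
  if 1 ≤ r ∧ r ≤ image.length ∧ 1 ≤ c ∧ c ≤ (image.headD []).length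
  then (image.getD (r - 1) []).getD (c - 1) 0 else 0

theorem pvPadA_cell (image : List (List Int)) (r c : Nat) :
    ((pvPadA image).getD r []).getD c 0 = pvCell image r c := by
  have hlen : (pvPadA image).length = image.length + 2 := by simp [pvPadA]
  by_cases hr : r < image.length + 2
  · have hrow : (pvPadA image).getD r [] =
        (List.range ((image.headD []).length + 2)).map (fun c =>
          if 1 ≤ r ∧ r ≤ image.length ∧ 1 ≤ c ∧ c ≤ (image.headD []).length
          then (image.getD (r - 1) []).getD (c - 1) 0 else 0) := by
      rw [List.getD_eq_getElem _ _ (by omega)]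
      simp [pvPadA]
    rw [hrow]
    by_cases hc : c < (image.headD []).length + 2
    · rw [List.getD_eq_getElem _ _ (by simpa using hc)]
      simp [pvCell]
    · have h0 : ((List.range ((image.headD []).length + 2)).map (fun c =>
          if 1 ≤ r ∧ r ≤ image.length ∧ 1 ≤ c ∧ c ≤ (image.headD []).length
          then (image.getD (r - 1) []).getD (c - 1) 0 else 0)).getD c 0 = 0 :=
        List.getD_eq_default _ _ (by simpa using Nat.le_of_not_lt hc)
      rw [h0]
      unfold pvCell
      rw [if_neg (by omega)]
  · have h0 : (pvPadA image).getD r [] = [] := List.getD_eq_default _ _ (by omega)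
    rw [h0]
    unfold pvCell
    simp only [List.getD_nil]
    rw [if_neg (by omega)]

theorem pvPadB_cell (image : List (List Int)) (hpre : Pre_gaussian_filter_python image)
    (r c : Nat) : ((pvPadB image).getD r []).getD c 0 = pvCell image r c := by
  obtain ⟨hne, hrows⟩ := hpre
  match r with
  | 0 => simp [pvPadB, pvCell]
  | Nat.succ k =>
    have hstep : (pvPadB image).getD (k + 1) [] =
        (image.map (fun row => 0 :: (List.take (image.headD []).length row ++ [0])) ++
          [List.replicate ((image.headD []).length + 2) (0 : Int)]).getD k [] := by
      simp [pvPadB]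
    rw [hstep]
    by_cases hk : k < image.length
    · have hlenk : (image.headD []).length ≤ image[k].length :=
        hrows _ (List.getElem_mem _)
      have hrow : (image.map (fun row => 0 :: (List.take (image.headD []).length row ++ [0])) ++
          [List.replicate ((image.headD []).length + 2) (0 : Int)]).getD k [] =
          0 :: (List.take (image.headD []).length image[k] ++ [0]) := by
        rw [List.getD_append _ _ _ _ (by simpa using hk)]
        rw [List.getD_eq_getElem _ _ (by simpa using hk)]
        simp
      rw [hrow]
      match c with
      | 0 =>
        unfold pvCell
        rw [if_neg (by omega)]
        simp
      | Nat.succ j =>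
        simp only [List.getD_cons_succ]
        have htake : (List.take (image.headD []).length image[k]).length =
            (image.headD []).length := by rw [List.length_take]; omega
        by_cases hj : j < (image.headD []).length
        · have hval : (List.take (image.headD []).length image[k] ++ [0]).getD j 0 =
              (image[k]'(by omega))[j]'(by omega) := by
            rw [List.getD_append _ _ _ _ (by omega)]
            rw [List.getD_eq_getElem _ _ (by omega)]
            exact List.getElem_take
          rw [hval]
          unfold pvCell
          rw [if_pos (by omega)]
          have e1 : k + 1 - 1 = k := rfl
          have e2 : j + 1 - 1 = j := rfl
          have himg : image.getD k [] = image[k] := List.getD_eq_getElem _ _ (by omega)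
          rw [e1, e2, himg, List.getD_eq_getElem _ _ (by omega)]
        · unfold pvCell
          rw [if_neg (by omega)]
          by_cases hj2 : j = (image.headD []).length
          · subst hj2
            rw [List.getD_append_right _ _ _ _ htake.le]
            rw [htake]
            simp
          · exact List.getD_eq_default _ _
              (by rw [List.length_append, htake, List.length_singleton]; omega)
    · unfold pvCell
      rw [if_neg (by omega)]
      by_cases hk2 : k = image.length
      · subst hk2
        rw [List.getD_append_right _ _ _ _ (by simp)]
        simp
      · have h0 : (image.map (fun row => 0 :: (List.take (image.headD []).length row ++ [0])) ++
            [List.replicate ((image.headD []).length + 2) (0 : Int)]).getD k [] = [] :=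
          List.getD_eq_default _ _ (by simp; omega)
        rw [h0]
        simp

theorem pvPadB_length (image : List (List Int)) :
    (pvPadB image).length = image.length + 2 := by
  simp [pvPadB]

theorem pvPadB_row_length (image : List (List Int)) (hpre : Pre_gaussian_filter_python image)
    (r : Nat) (hr : r < image.length + 2) :
    ((pvPadB image).getD r []).length = (image.headD []).length + 2 := by
  obtain ⟨hne, hrows⟩ := hpre
  unfold pvPadB
  match r with
  | 0 => simp
  | Nat.succ k =>
    simp only [List.getD_cons_succ]
    by_cases hk : k < image.length
    · rw [List.getD_append _ _ _ _ (by simpa using hk)]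
      rw [List.getD_eq_getElem _ _ (by simpa using hk), List.getElem_map]
      have hlen : (image.headD []).length ≤ image[k].length := hrows _ (List.getElem_mem _)
      rw [List.length_cons, List.length_append, List.length_take, List.length_singleton]
      omega
    · have hk2 : k = image.length := by omega
      subst hk2
      rw [List.getD_append_right _ _ _ _ (by simp)]
      simp

theorem pvHPass_length (l : List Int) : (pvHPass l).length = l.length - 2 := by
  fun_induction pvHPass l with
  | case1 a b c rest ih => simp [ih]
  | case2 x h =>
    match x, h with
    | [], _ => rfl
    | [a], _ => rfl
    | [a, b], _ => rfl
    | a :: b :: c :: rest, h => exact absurd rfl (h a b c rest)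

theorem pvHPass_getD (l : List Int) (j : Nat) (hj : j + 2 < l.length) :
    (pvHPass l).getD j 0 = l.getD j 0 + 2 * l.getD (j + 1) 0 + l.getD (j + 2) 0 := by
  fun_induction pvHPass l generalizing j with
  | case1 a b c rest ih =>
    cases j with
    | zero => simp
    | succ j => simpa using ih j (by simpa using hj)
  | case2 x h =>
    match x, h with
    | [], _ => simp at hj
    | [a], _ => simp at hj
    | [a, b], _ => simp at hj
    | a :: b :: c :: rest, h => exact absurd rfl (h a b c rest)

theorem pvVPass_length (rows : List (List Int)) : (pvVPass rows).length = rows.length - 2 := by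
  fun_induction pvVPass rows with
  | case1 a b c rest ih => simp [ih]
  | case2 x h =>
    match x, h with
    | [], _ => rfl
    | [a], _ => rfl
    | [a, b], _ => rfl
    | a :: b :: c :: rest, h => exact absurd rfl (h a b c rest)

theorem pvVPass_getD (rows : List (List Int)) (i : Nat) (hi : i + 2 < rows.length) :
    (pvVPass rows).getD i [] = pvVComb (rows.getD i []) (rows.getD (i + 1) []) (rows.getD (i + 2) []) := by
  fun_induction pvVPass rows generalizing i with
  | case1 a b c rest ih =>
    cases i with
    | zero => simp
    | succ i => simpa using ih i (by simpa using hi)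
  | case2 x h =>
    match x, h with
    | [], _ => simp at hi
    | [a], _ => simp at hi
    | [a, b], _ => simp at hi
    | a :: b :: c :: rest, h => exact absurd rfl (h a b c rest)

theorem pvVComb_length (a b c : List Int) :
    (pvVComb a b c).length = min (min a.length b.length) c.length := by
  fun_induction pvVComb a b c with
  | case1 x xs y ys z zs ih => simp [ih]
  | case2 x y z h =>
    match x, y, z, h with
    | [], _, _, _ => simp
    | _ :: _, [], _, _ => simp
    | _ :: _, _ :: _, [], _ => simp
    | x :: xs, y :: ys, z :: zs, h => exact (h x xs y ys z zs rfl rfl rfl).elim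

theorem pvVComb_getD (a b c : List Int) (j : Nat)
    (hj : j < a.length ∧ j < b.length ∧ j < c.length) :
    (pvVComb a b c).getD j 0 = max 0 (min 255 (pvRound16 (a.getD j 0 + 2 * b.getD j 0 + c.getD j 0))) := by
  fun_induction pvVComb a b c generalizing j with
  | case1 x xs y ys z zs ih =>
    cases j with
    | zero => simp
    | succ j => simpa using ih j (by simp at hj ⊢; omega)
  | case2 x y z h =>
    match x, y, z, h with
    | [], _, _, _ => simp at hj
    | _ :: _, [], _, _ => simp at hj
    | _ :: _, _ :: _, [], _ => simp at hj
    | x :: xs, y :: ys, z :: zs, h => exact (h x xs y ys z zs rfl rfl rfl).elim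

-- ===== VERDICT (by name: the statement is the Claim_ definition above) =====
theorem gaussian_filter_python_spec : Claim_equal_gaussian_filter_python := by
  intro image hdom hpre
  unfold Spec_gaussian_filter_python gaussian_filter_python gaussian_filter_python_alt
  simp only []
  have hPBlen : (pvPadB image).length = image.length + 2 := pvPadB_length image
  have hrowslen : ((pvPadB image).map pvHPass).length = image.length + 2 := by
    rw [List.length_map, hPBlen]
  have hrowget : ∀ i, i < image.length + 2 →
      ((pvPadB image).map pvHPass).getD i [] = pvHPass ((pvPadB image).getD i []) := by
    intro i hi
    rw [List.getD_eq_getElem _ _ (by rw [hrowslen]; omega), List.getElem_map,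
      ← List.getD_eq_getElem _ _ (by rw [hPBlen]; omega)]
  have hrowlen2 : ∀ i, i < image.length + 2 →
      (((pvPadB image).map pvHPass).getD i []).length = (image.headD []).length := by
    intro i hi
    rw [hrowget i hi, pvHPass_length, pvPadB_row_length image hpre i hi]
    omega
  apply List.ext_getElem
  · rw [List.length_map, List.length_range, pvVPass_length, hrowslen]
    omega
  intro i hi1 hi2
  have hi : i < image.length := by simpa using hi1
  rw [List.getElem_map, List.getElem_range]
  rw [← List.getD_eq_getElem _ _ hi2, pvVPass_getD _ i (by rw [hrowslen]; omega)]
  apply List.ext_getElem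
  · rw [List.length_map, List.length_range, pvVComb_length,
      hrowlen2 i (by omega), hrowlen2 (i + 1) (by omega), hrowlen2 (i + 2) (by omega)]
    omega
  intro j hj1 hj2
  have hj : j < (image.headD []).length := by simpa using hj1
  rw [List.getElem_map, List.getElem_range]
  rw [← List.getD_eq_getElem _ _ hj2]
  rw [pvVComb_getD _ _ _ j
    ⟨by rw [hrowlen2 i (by omega)]; omega, by rw [hrowlen2 (i + 1) (by omega)]; omega,
     by rw [hrowlen2 (i + 2) (by omega)]; omega⟩]
  rw [hrowget i (by omega), hrowget (i + 1) (by omega), hrowget (i + 2) (by omega)]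
  rw [pvHPass_getD _ j (by rw [pvPadB_row_length image hpre i (by omega)]; omega),
      pvHPass_getD _ j (by rw [pvPadB_row_length image hpre (i + 1) (by omega)]; omega),
      pvHPass_getD _ j (by rw [pvPadB_row_length image hpre (i + 2) (by omega)]; omega)]
  simp only [pvPadB_cell image hpre]
  have hr3 : List.range 3 = [0, 1, 2] := rfl
  rw [hr3]
  simp only [List.foldl_cons, List.foldl_nil, pvPadA_cell, Nat.add_zero]
  have k00 : ((pvKernel.getD 0 []).getD 0 0) = 1 := rfl
  have k01 : ((pvKernel.getD 0 []).getD 1 0) = 2 := rfl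
  have k02 : ((pvKernel.getD 0 []).getD 2 0) = 1 := rfl
  have k10 : ((pvKernel.getD 1 []).getD 0 0) = 2 := rfl
  have k11 : ((pvKernel.getD 1 []).getD 1 0) = 4 := rfl
  have k12 : ((pvKernel.getD 1 []).getD 2 0) = 2 := rfl
  have k20 : ((pvKernel.getD 2 []).getD 0 0) = 1 := rfl
  have k21 : ((pvKernel.getD 2 []).getD 1 0) = 2 := rfl
  have k22 : ((pvKernel.getD 2 []).getD 2 0) = 1 := rfl
  rw [k00, k01, k02, k10, k11, k12, k20, k21, k22]
  congr 2
  ring_nf
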